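-- pv_equiv track=rewrite | github.com/ArchitWadehra/DSA | 18_DP_2.py | coinTower
-- ===== SOURCE A (Python) =====
-- def coinTower(N, X, Y):
--     if N == 0: return False
--     if N < 0: return True
--
--     case1 = coinTower(N - 1, X, Y)
--     case2 = coinTower(N - X, X, Y)
--     case3 = coinTower(N - Y, X, Y)
--
--     if case1 == True and case2 == True and case3 == True: return False
--     else: return True
-- ===== SOURCE B (Python) =====
-- def coinTower(N, X, Y):
--     # Bottom-up DP over tower heights 0..N instead of A's triple recursion.
--     if N <= 0:
--         return N < 0
--     win = [False] * (N + 1)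
--     for i in range(1, N + 1):
--         c1 = win[i - 1] if i - 1 >= 0 else True
--         c2 = win[i - X] if i - X >= 0 else True
--         c3 = win[i - Y] if i - Y >= 0 else True
--         win[i] = not (c1 and c2 and c3)
--     return win[N]
-- ===== Notes on version B (the rewrite author's own statement) =====
-- stated objective: faster
-- what changed: Replaced A's exponential triple recursion with a single bottom-up DP pass that tabulates the win/lose value for every tower height 0..N.
-- outside the precondition, e.g. on coinTower(5, 0, 2): A raises RecursionError, B returns True; on coinTower(3, -1, 2): A raises RecursionError, B raises IndexError
import Mathlib
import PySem

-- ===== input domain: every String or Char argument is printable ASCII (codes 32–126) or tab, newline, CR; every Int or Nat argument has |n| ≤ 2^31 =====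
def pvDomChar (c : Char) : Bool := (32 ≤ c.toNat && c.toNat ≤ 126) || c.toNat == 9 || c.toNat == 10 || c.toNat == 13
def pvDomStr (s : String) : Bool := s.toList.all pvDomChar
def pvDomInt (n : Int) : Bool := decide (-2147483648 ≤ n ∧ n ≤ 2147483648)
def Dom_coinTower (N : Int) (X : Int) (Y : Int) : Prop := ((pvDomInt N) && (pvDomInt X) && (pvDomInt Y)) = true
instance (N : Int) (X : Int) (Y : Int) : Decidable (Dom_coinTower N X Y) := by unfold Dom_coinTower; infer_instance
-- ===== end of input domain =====

-- B replaces A's exponential triple recursion by one bottom-up DP pass over heights 0..N (objective: faster, asymptotically).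

-- ===== PORT A =====
-- A's unbounded recursion, made total with a fuel parameter; with 1 ≤ X and 1 ≤ Y every
-- recursive call lowers N by at least 1, so fuel N.toNat is always enough (the fuel-0 branch
-- is unreachable on Pre_); Pre_ excludes the inputs where Python A hits RecursionError.
def coinTowerFuel (fuel : Nat) (N : Int) (X : Int) (Y : Int) : Bool :=
  if N = 0 then false
  else if N < 0 then true
  else match fuel with
    | 0 => false
    | f + 1 =>
      let case1 := coinTowerFuel f (N - 1) X Y
      let case2 := coinTowerFuel f (N - X) X Y
      let case3 := coinTowerFuel f (N - Y) X Y
      if case1 && case2 && case3 then false else true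

def coinTower (N : Int) (X : Int) (Y : Int) : Bool :=
  coinTowerFuel N.toNat N X Y

-- ===== PORT B =====
-- Source B: preallocated table `win` of N+1 entries, filled left to right; win[i-k] reads are
-- in range for i-k ≥ 0 on Pre_, so List.getD is exact there.
def coinTower_alt (N : Int) (X : Int) (Y : Int) : Bool :=
  if N ≤ 0 then decide (N < 0)
  else
    let win := (PySem.List.pyRange 1 (N + 1) 1).foldl
      (fun (w : List Bool) (i : Int) =>
        let c1 := if i - 1 ≥ 0 then w.getD (i - 1).toNat false else true
        let c2 := if i - X ≥ 0 then w.getD (i - X).toNat false else true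
        let c3 := if i - Y ≥ 0 then w.getD (i - Y).toNat false else true
        w.set i.toNat (!(c1 && c2 && c3)))
      (List.replicate (N + 1).toNat false)
    win.getD N.toNat false

-- ===== PRECONDITION & SPEC =====
-- Pre_ excludes N ≥ 1 with X ≤ 0 or Y ≤ 0: there A's recursion never terminates (Python
-- raises RecursionError), so A returns no value.
def Pre_coinTower (N : Int) (X : Int) (Y : Int) : Prop := N ≤ 0 ∨ (1 ≤ X ∧ 1 ≤ Y)
instance (N : Int) (X : Int) (Y : Int) : Decidable (Pre_coinTower N X Y) := by unfold Pre_coinTower; infer_instance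
def pvWitness_coinTower : Int × Int × Int := (6, 2, 3)

def Spec_coinTower (N : Int) (X : Int) (Y : Int) (out : Bool) : Prop := out = coinTower_alt N X Y
instance (N : Int) (X : Int) (Y : Int) (out : Bool) : Decidable (Spec_coinTower N X Y out) := by unfold Spec_coinTower; infer_instance

-- ===== CLAIM (what is proved, stated in full; the proofs are below) =====
def Claim_equal_coinTower : Prop := ∀ (N : Int) (X : Int) (Y : Int), Dom_coinTower N X Y → Pre_coinTower N X Y → Spec_coinTower N X Y (coinTower N X Y)

-- ===== LEMMAS AND PROOFS =====

-- the fold step of B's port, named for the proofs (definitionally the lambda in coinTower_alt)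
def pvStep (X Y : Int) (w : List Bool) (i : Int) : List Bool :=
  let c1 := if i - 1 ≥ 0 then w.getD (i - 1).toNat false else true
  let c2 := if i - X ≥ 0 then w.getD (i - X).toNat false else true
  let c3 := if i - Y ≥ 0 then w.getD (i - Y).toNat false else true
  w.set i.toNat (!(c1 && c2 && c3))

theorem coinTower_alt_eq (N X Y : Int) :
    coinTower_alt N X Y =
      if N ≤ 0 then decide (N < 0)
      else ((PySem.List.pyRange 1 (N + 1) 1).foldl (pvStep X Y)
              (List.replicate (N + 1).toNat false)).getD N.toNat false := rfl

theorem fuel_nonpos (f : Nat) (N X Y : Int) (h : N ≤ 0) :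
    coinTowerFuel f N X Y = decide (N < 0) := by
  unfold coinTowerFuel
  split_ifs with h1 h2 <;> simp <;> omega

theorem fuel_succ_pos (f : Nat) (N X Y : Int) (h : 0 < N) :
    coinTowerFuel (f + 1) N X Y =
      !(coinTowerFuel f (N - 1) X Y && coinTowerFuel f (N - X) X Y && coinTowerFuel f (N - Y) X Y) := by
  have hdef : coinTowerFuel (f + 1) N X Y =
      if N = 0 then false else if N < 0 then true
      else if coinTowerFuel f (N - 1) X Y && coinTowerFuel f (N - X) X Y && coinTowerFuel f (N - Y) X Y
        then false else true := rfl
  rw [hdef, if_neg (by omega), if_neg (by omega)]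
  cases coinTowerFuel f (N - 1) X Y <;> cases coinTowerFuel f (N - X) X Y <;>
    cases coinTowerFuel f (N - Y) X Y <;> rfl

theorem fuel_congr (X Y : Int) (hX : 1 ≤ X) (hY : 1 ≤ Y) :
    ∀ (m : Nat) (N : Int) (f g : Nat), N.toNat ≤ m → N.toNat ≤ f → N.toNat ≤ g →
      coinTowerFuel f N X Y = coinTowerFuel g N X Y := by
  intro m
  induction m with
  | zero =>
    intro N f g hm _ _
    have h0 : N ≤ 0 := by omega
    rw [fuel_nonpos _ _ _ _ h0, fuel_nonpos _ _ _ _ h0]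
  | succ m ih =>
    intro N f g hm hf hg
    by_cases h0 : N ≤ 0
    · rw [fuel_nonpos _ _ _ _ h0, fuel_nonpos _ _ _ _ h0]
    · replace h0 : 0 < N := by omega
      obtain ⟨f', rfl⟩ : ∃ f', f = f' + 1 := ⟨f - 1, by omega⟩
      obtain ⟨g', rfl⟩ : ∃ g', g = g' + 1 := ⟨g - 1, by omega⟩
      rw [fuel_succ_pos _ _ _ _ h0, fuel_succ_pos _ _ _ _ h0]
      rw [ih (N - 1) f' g' (by omega) (by omega) (by omega),
          ih (N - X) f' g' (by omega) (by omega) (by omega),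
          ih (N - Y) f' g' (by omega) (by omega) (by omega)]

theorem coinTower_nonpos (N X Y : Int) (h : N ≤ 0) :
    coinTower N X Y = decide (N < 0) := fuel_nonpos _ _ _ _ h

theorem coinTower_unfold (N X Y : Int) (h : 0 < N) (hX : 1 ≤ X) (hY : 1 ≤ Y) :
    coinTower N X Y =
      !(coinTower (N - 1) X Y && coinTower (N - X) X Y && coinTower (N - Y) X Y) := by
  unfold coinTower
  obtain ⟨m, hm⟩ : ∃ m, N.toNat = m + 1 := ⟨N.toNat - 1, by omega⟩
  rw [hm, fuel_succ_pos _ _ _ _ h]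
  rw [fuel_congr X Y hX hY m (N - 1) m (N - 1).toNat (by omega) (by omega) (by omega),
      fuel_congr X Y hX hY m (N - X) m (N - X).toNat (by omega) (by omega) (by omega),
      fuel_congr X Y hX hY m (N - Y) m (N - Y).toNat (by omega) (by omega) (by omega)]

-- `coinTower` at an in-range table read equals `coinTower` at the Int difference
theorem read_eq (X Y k : Int) (n : Nat) (_hk : 1 ≤ k) :
    (if (n : Int) + 1 - k ≥ 0 then coinTower (((n : Int) + 1 - k).toNat : Int) X Y else true)
      = coinTower ((n : Int) + 1 - k) X Y := by
  split_ifs with hnn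
  · rw [Int.toNat_of_nonneg hnn]
  · rw [coinTower_nonpos _ _ _ (by omega)]
    simp; omega

-- invariant of B's fold: after processing heights 1..n the table holds A's values at 0..n
theorem fold_inv (X Y : Int) (hX : 1 ≤ X) (hY : 1 ≤ Y) (len : Nat) :
    ∀ (n : Nat), n + 1 ≤ len →
      (((PySem.List.pyRange 1 ((n : Int) + 1) 1).foldl (pvStep X Y)
          (List.replicate len false)).length = len) ∧
      (∀ j : Nat, j ≤ n →
        ((PySem.List.pyRange 1 ((n : Int) + 1) 1).foldl (pvStep X Y)
            (List.replicate len false)).getD j false = coinTower (j : Int) X Y) := by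
  intro n
  induction n with
  | zero =>
    intro hlen
    rw [PySem.List.pyRange_one_eq_nil (by omega)]
    constructor
    · simp
    · intro j hj
      interval_cases j
      simp [coinTower_nonpos 0 X Y le_rfl, List.getD_eq_getElem?_getD]
  | succ n ih =>
    intro hlen
    push_cast
    obtain ⟨ihlen, ihval⟩ := ih (by omega)
    have hsplit : PySem.List.pyRange 1 ((n : Int) + 1 + 1) 1
        = PySem.List.pyRange 1 ((n : Int) + 1) 1 ++ [(n : Int) + 1] := by
      have := PySem.List.pyRange_one_succ_right (a := 1) (b := (n : Int) + 1) (by omega)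
      simpa using this
    set L := (PySem.List.pyRange 1 ((n : Int) + 1) 1).foldl (pvStep X Y)
      (List.replicate len false) with hL
    have hfold : (PySem.List.pyRange 1 ((n : Int) + 1 + 1) 1).foldl (pvStep X Y)
        (List.replicate len false) = pvStep X Y L ((n : Int) + 1) := by
      rw [hsplit, List.foldl_append]; rfl
    have hread : ∀ k : Int, 1 ≤ k →
        (if (n : Int) + 1 - k ≥ 0 then L.getD ((n : Int) + 1 - k).toNat false else true)
          = coinTower ((n : Int) + 1 - k) X Y := by
      intro k hk
      rw [← read_eq X Y k n hk]
      split_ifs with hnn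
      · exact ihval _ (by omega)
      · rfl
    have hval : pvStep X Y L ((n : Int) + 1)
        = L.set (n + 1) (coinTower ((n : Int) + 1) X Y) := by
      unfold pvStep
      rw [hread 1 le_rfl, hread X hX, hread Y hY]
      rw [coinTower_unfold ((n : Int) + 1) X Y (by omega) hX hY]
      rw [show ((n : Int) + 1).toNat = n + 1 from by omega]
    rw [hfold, hval]
    constructor
    · simp [ihlen]
    · intro j hj
      by_cases hje : j = n + 1
      · subst hje
        rw [List.getD_eq_getElem?_getD, List.getElem?_set_self (by omega)]
        simp
      · rw [List.getD_eq_getElem?_getD, List.getElem?_set_ne (by omega), ← List.getD_eq_getElem?_getD]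
        exact ihval j (by omega)

-- ===== VERDICT (by name: the statement is the Claim_ definition above) =====
theorem coinTower_spec : Claim_equal_coinTower := by
  intro N X Y _ hpre
  unfold Spec_coinTower
  rw [coinTower_alt_eq]
  by_cases h0 : N ≤ 0
  · rw [if_pos h0]
    exact coinTower_nonpos N X Y h0
  · replace h0 : 0 < N := by omega
    obtain ⟨hX, hY⟩ : 1 ≤ X ∧ 1 ≤ Y := by
      rcases hpre with h | h
      · omega
      · exact h
    rw [if_neg (by omega)]
    obtain ⟨n, hn⟩ : ∃ n : Nat, N = (n : Int) + 1 := ⟨N.toNat - 1, by omega⟩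
    subst hn
    have hinv := (fold_inv X Y hX hY ((n : Int) + 1 + 1).toNat (n + 1) (by omega)).2 (n + 1) le_rfl
    have hidx : ((n : Int) + 1).toNat = n + 1 := by omega
    push_cast at hinv
    rw [hidx, hinv]
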